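-- pv_equiv track=rewrite | github.com/gitter-badger/epistasis | epistasis/utils.py | params_index_map
-- ===== SOURCE A (Python) =====
-- def params_index_map(mutations):
--     """Write a dictionary that maps mutations dictionary to indices in dummy
--     variable matrix.
--
--     Parameters
--     ----------
--     mutations : dict
--         mapping each site to their accessible mutations alphabet.
--         mutations = {site_number : alphabet} If site does not mutate,
--         value should be None.
--
--     Returns
--     -------
--     mutations : dict
--         `mutations = { site_number : indices }`. If the site alphabet is
--         note included, the model will assume binary between wildtype and derived.
--
--     Example
--     -------
--     .. code-block:: python
--
--         mutations = {
--             0: [indices],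
--             1: [indices],
--             ...
--         }
--     """
--     param_map = dict()
--     n_sites = 1
--     for m in mutations:
--         if mutations[m] is None:
--             param_map[m] = None
--         else:
--             param_map[m] = list(range(n_sites, n_sites + len(mutations[m]) - 1))
--             n_sites += len(mutations[m])-1
--     return param_map
-- ===== SOURCE B (Python) =====
-- def params_index_map(mutations):
--     items = list(mutations.items())
--     # pass 1: per-site index-count increments
--     incs = [0 if v is None else len(v) - 1 for _, v in items]
--     # pass 2: prefix-sum table of start offsets, beginning at 1
--     starts = []
--     acc = 1
--     for inc in incs:
--         starts.append(acc)
--         acc += inc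
--     # pass 3: assignment
--     return {m: (None if v is None else list(range(s, s + inc)))
--             for (m, v), (s, inc) in zip(items, zip(starts, incs))}
-- ===== Notes on version B (the rewrite author's own statement) =====
-- stated objective: alternative
-- what changed: Replaces A's single loop with an inline running counter by three separate passes: a per-site increment list, an explicit prefix-sum table of start offsets, and a final zip-assignment pass.
import Mathlib
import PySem

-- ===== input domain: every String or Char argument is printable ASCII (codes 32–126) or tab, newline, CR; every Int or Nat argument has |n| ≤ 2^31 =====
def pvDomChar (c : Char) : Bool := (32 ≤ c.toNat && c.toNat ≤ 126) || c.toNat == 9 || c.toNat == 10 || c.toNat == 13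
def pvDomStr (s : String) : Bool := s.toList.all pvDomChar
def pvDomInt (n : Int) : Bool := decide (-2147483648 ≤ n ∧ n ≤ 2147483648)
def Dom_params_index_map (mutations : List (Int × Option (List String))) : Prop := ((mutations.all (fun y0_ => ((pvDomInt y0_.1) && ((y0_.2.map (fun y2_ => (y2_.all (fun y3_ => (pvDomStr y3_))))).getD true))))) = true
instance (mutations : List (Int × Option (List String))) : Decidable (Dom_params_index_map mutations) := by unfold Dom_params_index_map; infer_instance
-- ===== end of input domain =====

-- B replaces A's single loop with a running counter by three passes (increment list, prefix-sum
-- start table, zip-assignment); same cost, different decomposition ('alternative').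

-- ===== PORT A =====
-- The dict argument is normalised with Dict.ofList (Python dict construction: duplicate keys
-- overwrite in place), then iterated in insertion order; since the keys of a dict are distinct,
-- writing param_map[m] for each m appends a fresh entry, ported as a list append.
def params_index_map (mutations : List (Int × Option (List String))) : List (Int × Option (List Int)) :=
  (((PySem.Dict.ofList mutations).items).foldl
    (fun (st : List (Int × Option (List Int)) × Int) p =>
      match p.2 with
      | none => (st.1 ++ [(p.1, none)], st.2)
      | some v => (st.1 ++ [(p.1, some (PySem.List.pyRange st.2 (st.2 + (v.length : Int) - 1) 1))],
                   st.2 + (v.length : Int) - 1))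
    ([], 1)).1

-- ===== PORT B =====
def params_index_map_alt (mutations : List (Int × Option (List String))) : List (Int × Option (List Int)) :=
  let items := (PySem.Dict.ofList mutations).items
  -- pass 1: per-site increments
  let incs : List Int := items.map (fun p => match p.2 with | none => 0 | some v => (v.length : Int) - 1)
  -- pass 2: prefix-sum table of start offsets beginning at 1
  let starts : List Int := (incs.foldl (fun (st : List Int × Int) inc => (st.1 ++ [st.2], st.2 + inc)) ([], 1)).1
  -- pass 3: assignment
  (items.zip (starts.zip incs)).map
    (fun q => match q.1.2 with
      | none => (q.1.1, none)
      | some _ => (q.1.1, some (PySem.List.pyRange q.2.1 (q.2.1 + q.2.2) 1)))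

-- ===== PRECONDITION & SPEC =====
def Spec_params_index_map (mutations : List (Int × Option (List String))) (out : List (Int × Option (List Int))) : Prop := out = params_index_map_alt mutations
instance (mutations : List (Int × Option (List String))) (out : List (Int × Option (List Int))) : Decidable (Spec_params_index_map mutations out) := by unfold Spec_params_index_map; infer_instance

-- ===== CLAIM (what is proved, stated in full; the proofs are below) =====
def Claim_equal_params_index_map : Prop := ∀ (mutations : List (Int × Option (List String))), Dom_params_index_map mutations → Spec_params_index_map mutations (params_index_map mutations)

-- ===== LEMMAS AND PROOFS =====

-- reference recursion: A's loop body over the remaining items, starting the counter at n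
def pvGo (items : List (Int × Option (List String))) (n : Int) : List (Int × Option (List Int)) :=
  match items with
  | [] => []
  | (k, none) :: t => (k, none) :: pvGo t n
  | (k, some v) :: t =>
      (k, some (PySem.List.pyRange n (n + (v.length : Int) - 1) 1)) :: pvGo t (n + (v.length : Int) - 1)

lemma pvA_fold (items : List (Int × Option (List String)))
    (acc : List (Int × Option (List Int))) (n : Int) :
    (items.foldl
      (fun (st : List (Int × Option (List Int)) × Int) p =>
        match p.2 with
        | none => (st.1 ++ [(p.1, none)], st.2)
        | some v => (st.1 ++ [(p.1, some (PySem.List.pyRange st.2 (st.2 + (v.length : Int) - 1) 1))],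
                     st.2 + (v.length : Int) - 1))
      (acc, n)).1 = acc ++ pvGo items n := by
  induction items generalizing acc n with
  | nil => simp [pvGo]
  | cons p t ih =>
      obtain ⟨k, v⟩ := p
      cases v with
      | none => simp [List.foldl, pvGo, ih]
      | some v => simp [List.foldl, pvGo, ih]

def pvScan (n : Int) (incs : List Int) : List Int :=
  match incs with
  | [] => []
  | i :: t => n :: pvScan (n + i) t

lemma pvStarts_fold (incs : List Int) (acc : List Int) (n : Int) :
    (incs.foldl (fun (st : List Int × Int) inc => (st.1 ++ [st.2], st.2 + inc)) (acc, n)).1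
      = acc ++ pvScan n incs := by
  induction incs generalizing acc n with
  | nil => simp [pvScan]
  | cons i t ih => simp [List.foldl, pvScan, ih]

def pvInc (p : Int × Option (List String)) : Int :=
  match p.2 with | none => 0 | some v => (v.length : Int) - 1

lemma pvB_zip (items : List (Int × Option (List String))) (n : Int) :
    (items.zip ((pvScan n (items.map pvInc)).zip (items.map pvInc))).map
      (fun q => match q.1.2 with
        | none => (q.1.1, none)
        | some _ => ((q.1.1 : Int), some (PySem.List.pyRange q.2.1 (q.2.1 + q.2.2) 1)))
      = pvGo items n := by
  induction items generalizing n with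
  | nil => simp [pvGo]
  | cons p t ih =>
      obtain ⟨k, v⟩ := p
      cases v with
      | none =>
          simp only [List.map, pvInc, pvScan, List.zip_cons_cons, pvGo, add_zero]
          exact congrArg _ (ih n)
      | some v =>
          simp only [List.map, pvInc, pvScan, List.zip_cons_cons, pvGo, ← add_sub_assoc]
          exact congrArg _ (ih _)

-- ===== VERDICT (by name: the statement is the Claim_ definition above) =====
theorem params_index_map_spec : Claim_equal_params_index_map := by
  intro mutations _
  show params_index_map mutations = params_index_map_alt mutations
  unfold params_index_map
  rw [pvA_fold]
  simp only [params_index_map_alt]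
  rw [pvStarts_fold]
  simp only [List.nil_append]
  exact (pvB_zip _ 1).symm
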